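-- pv_equiv track=rewrite | github.com/stevieray8450/codewars_rangeextractor | range_extraction.py | extract
-- ===== SOURCE A (Python) =====
-- def extract(nums, index):
--     beginningValue = nums[index]
--     resultString = ''
--
--     # if true, the last value is not consecutive with the previous values
--     if index == len(nums) - 1:
--         return resultString + '{0}'.format(nums[index])
--
--     while index < len(nums) - 1 and nums[index] == nums[index + 1] - 1:
--         index += 1
--
--     endValue = nums[index]
--
--     if endValue - beginningValue >= 2:
--         resultString += '{0}-{1}'.format(beginningValue, endValue)
--     else:
--         resultString += '{0},{1}'.format(beginningValue, endValue)
--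
--     # if true, your last element is consecutive with the others
--     # short-circuit; no more to do here
--     if index == len(nums) - 1:
--         return resultString
--
--     # increment the index and pick up range-extraction from that point
--     resultString += ',{}'.format(extract(nums, index + 1))
--
--     return resultString
-- ===== SOURCE B (Python) =====
-- def extract(nums, index):
--     # Iterative re-implementation: collect the comma-joined pieces in a list
--     # with an explicit cursor instead of recursing, then join once.
--     n = len(nums)
--     parts = []
--     i = index
--     while True:
--         begin = nums[i]
--         if i == n - 1:
--             parts.append('{0}'.format(begin))
--             break
--         while i < n - 1 and nums[i + 1] == nums[i] + 1:
--             i += 1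
--         end = nums[i]
--         parts.append('{0}-{1}'.format(begin, end) if end - begin >= 2
--                      else '{0},{1}'.format(begin, end))
--         if i == n - 1:
--             break
--         i += 1
--     return ','.join(parts)
-- ===== Notes on version B (the rewrite author's own statement) =====
-- stated objective: alternative
-- what changed: Replaces A's non-tail recursion, which re-concatenates the whole tail string behind a comma at every recursion level, by a single iterative cursor loop that collects the pieces in a list and joins them once at the end.
import Mathlib
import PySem

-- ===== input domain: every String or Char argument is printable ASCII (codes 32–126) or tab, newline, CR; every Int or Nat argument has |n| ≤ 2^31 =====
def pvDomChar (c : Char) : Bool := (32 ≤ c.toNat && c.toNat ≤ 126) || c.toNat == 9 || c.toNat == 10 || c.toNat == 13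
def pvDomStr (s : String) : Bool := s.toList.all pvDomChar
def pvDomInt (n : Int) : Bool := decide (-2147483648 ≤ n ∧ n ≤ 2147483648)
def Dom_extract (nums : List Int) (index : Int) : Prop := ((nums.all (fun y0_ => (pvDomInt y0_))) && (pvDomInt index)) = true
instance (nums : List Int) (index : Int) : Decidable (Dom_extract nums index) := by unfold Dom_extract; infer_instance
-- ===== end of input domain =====

-- B replaces A's non-tail recursion (which re-concatenates the whole tail string behind a
-- comma at every recursion level) by a single iterative cursor loop that collects the
-- pieces in a list and joins them once at the end.

-- ===== PORT A =====

-- A's inner `while index < len(nums)-1 and nums[index] == nums[index+1]-1: index += 1`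
def runEndA (nums : List Int) (i : Int) : Int :=
  if h : i < (nums.length : Int) - 1 ∧
      PySem.List.pyGet? nums i = (PySem.List.pyGet? nums (i + 1)).map (fun v => v - 1) then
    runEndA nums (i + 1)
  else i
termination_by ((nums.length : Int) - i).toNat
decreasing_by have := h.1; omega

theorem runEndA_ge (nums : List Int) (i : Int) : i ≤ runEndA nums i := by
  fun_induction runEndA nums i <;> omega

theorem bounds_of_pyGet?_eq_some {α : Type} (xs : List α) (i : Int) (x : α)
    (h : PySem.List.pyGet? xs i = some x) : -(xs.length : Int) ≤ i ∧ i < (xs.length : Int) := by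
  by_contra hc
  have hn : PySem.List.pyGet? xs i = none :=
    (PySem.List.pyGet?_eq_none_iff xs i).mpr (by simpa [PySem.Raise.InRange] using hc)
  rw [h] at hn
  simp at hn

-- port of A: the recursive range extractor (none at nums[index] = Python's IndexError, excluded by Pre_)
def extract (nums : List Int) (index : Int) : String :=
  match h : PySem.List.pyGet? nums index with
  | none => ""
  | some beginningValue =>
    if index = (nums.length : Int) - 1 then
      PySem.Int.toStr beginningValue
    else
      let i2 := runEndA nums index
      let endValue := (PySem.List.pyGet? nums i2).getD 0
      let resultString :=
        if endValue - beginningValue ≥ 2 then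
          PySem.Int.toStr beginningValue ++ "-" ++ PySem.Int.toStr endValue
        else
          PySem.Int.toStr beginningValue ++ "," ++ PySem.Int.toStr endValue
      if i2 = (nums.length : Int) - 1 then resultString
      else resultString ++ ("," ++ extract nums (i2 + 1))
termination_by ((nums.length : Int) - index).toNat
decreasing_by
  have h1 := runEndA_ge nums index
  have h2 := (bounds_of_pyGet?_eq_some nums index beginningValue h).2
  omega

-- ===== PORT B =====

-- B's inner `while i < n - 1 and nums[i+1] == nums[i] + 1: i += 1`
def runEndB (nums : List Int) (i : Int) : Int :=
  if h : i < (nums.length : Int) - 1 ∧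
      PySem.List.pyGet? nums (i + 1) = (PySem.List.pyGet? nums i).map (fun v => v + 1) then
    runEndB nums (i + 1)
  else i
termination_by ((nums.length : Int) - i).toNat
decreasing_by have := h.1; omega

theorem runEndB_ge (nums : List Int) (i : Int) : i ≤ runEndB nums i := by
  fun_induction runEndB nums i <;> omega

-- B's outer `while True` loop, accumulating `parts`
def loopB (nums : List Int) (i : Int) (parts : List String) : List String :=
  match h : PySem.List.pyGet? nums i with
  | none => parts
  | some b =>
    if i = (nums.length : Int) - 1 then parts ++ [PySem.Int.toStr b]
    else
      let j := runEndB nums i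
      let e := (PySem.List.pyGet? nums j).getD 0
      let s := if e - b ≥ 2 then PySem.Int.toStr b ++ "-" ++ PySem.Int.toStr e
               else PySem.Int.toStr b ++ "," ++ PySem.Int.toStr e
      if j = (nums.length : Int) - 1 then parts ++ [s]
      else loopB nums (j + 1) (parts ++ [s])
termination_by ((nums.length : Int) - i).toNat
decreasing_by
  have h1 := runEndB_ge nums i
  have h2 := (bounds_of_pyGet?_eq_some nums i b h).2
  omega

def extract_alt (nums : List Int) (index : Int) : String :=
  PySem.Str.join "," (loopB nums index [])

-- ===== PRECONDITION & SPEC =====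
-- exactly where the Python A returns: nums[index] raises IndexError unless -len ≤ index < len
def Pre_extract (nums : List Int) (index : Int) : Prop :=
  -(nums.length : Int) ≤ index ∧ index < (nums.length : Int)
instance (nums : List Int) (index : Int) : Decidable (Pre_extract nums index) := by
  unfold Pre_extract; infer_instance
def pvWitness_extract : List Int × Int := ([1, 2, 3, 7], 0)

def Spec_extract (nums : List Int) (index : Int) (out : String) : Prop := out = extract_alt nums index
instance (nums : List Int) (index : Int) (out : String) : Decidable (Spec_extract nums index out) := by unfold Spec_extract; infer_instance

-- ===== CLAIM (what is proved, stated in full; the proofs are below) =====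
def Claim_equal_extract : Prop := ∀ (nums : List Int) (index : Int), Dom_extract nums index → Pre_extract nums index → Spec_extract nums index (extract nums index)

-- ===== LEMMAS AND PROOFS =====

theorem runEndA_le (nums : List Int) (i : Int) (hi : i ≤ (nums.length : Int) - 1) :
    runEndA nums i ≤ (nums.length : Int) - 1 := by
  fun_induction runEndA nums i with
  | case1 i h ih => exact ih (by omega)
  | case2 i h => exact hi

theorem cond_iff (nums : List Int) (i : Int) :
    (PySem.List.pyGet? nums (i + 1) = (PySem.List.pyGet? nums i).map (fun v => v + 1)) ↔
    (PySem.List.pyGet? nums i = (PySem.List.pyGet? nums (i + 1)).map (fun v => v - 1)) := by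
  cases hA : PySem.List.pyGet? nums i <;> cases hB : PySem.List.pyGet? nums (i + 1) <;>
    simp <;> omega

theorem runEndB_eq (nums : List Int) (i : Int) : runEndB nums i = runEndA nums i := by
  fun_induction runEndA nums i with
  | case1 i h ih =>
      rw [runEndB, dif_pos ⟨h.1, (cond_iff nums i).mpr h.2⟩, ih]
  | case2 i h =>
      rw [runEndB, dif_neg]
      intro hc
      exact h ⟨hc.1, (cond_iff nums i).mp hc.2⟩

theorem loopB_acc (nums : List Int) (n : Nat) (i : Int) (parts : List String)
    (hn : ((nums.length : Int) - i).toNat ≤ n) :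
    loopB nums i parts = parts ++ loopB nums i [] := by
  induction n generalizing i parts with
  | zero =>
      rw [loopB, loopB]
      cases h : PySem.List.pyGet? nums i with
      | none => simp
      | some b =>
          have hb := bounds_of_pyGet?_eq_some nums i b h
          omega
  | succ n ih =>
      rw [loopB, loopB]
      cases h : PySem.List.pyGet? nums i with
      | none => simp
      | some b =>
          have hb := bounds_of_pyGet?_eq_some nums i b h
          have hge := runEndB_ge nums i
          by_cases h1 : i = (nums.length : Int) - 1
          · simp [h1]
          · by_cases h2 : runEndB nums i = (nums.length : Int) - 1
            · simp [h1, h2]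
            · simp only [if_neg h1, if_neg h2, List.nil_append]
              conv_lhs => rw [ih _ _ (by omega)]
              conv_rhs => rw [ih _ _ (by omega)]
              simp

theorem loopB_ne_nil (nums : List Int) (i : Int) (b : Int)
    (h : PySem.List.pyGet? nums i = some b) : loopB nums i [] ≠ [] := by
  have hb := bounds_of_pyGet?_eq_some nums i b h
  have hge := runEndB_ge nums i
  rw [loopB, h]
  by_cases h1 : i = (nums.length : Int) - 1
  · simp [h1]
  · by_cases h2 : runEndB nums i = (nums.length : Int) - 1
    · simp [h1, h2]
    · simp only [if_neg h1, if_neg h2, List.nil_append]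
      rw [loopB_acc nums ((nums.length : Int) - (runEndB nums i + 1)).toNat _ _ (le_refl _)]
      simp

theorem join_nil : PySem.Str.join "," [] = "" := by rfl

theorem join_singleton (s : String) : PySem.Str.join "," [s] = s := by
  simp [PySem.Str.join]

theorem join_cons_cons (a b : String) (r : List String) :
    PySem.Str.join "," (a :: b :: r) = a ++ ("," ++ PySem.Str.join "," (b :: r)) := by
  apply String.toList_inj.mp
  simp [PySem.Str.join, PySem.Chars.join_cons_cons]

theorem extract_eq_alt (nums : List Int) (index : Int) :
    extract nums index = PySem.Str.join "," (loopB nums index []) := by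
  fun_induction extract nums index with
  | case1 i h =>
      rw [loopB, h, join_nil]
  | case2 b h =>
      rw [loopB, h]
      simp [join_singleton]
  | case3 i b h hi i2 e r hi2 =>
      have hi2' : runEndA nums i = (nums.length : Int) - 1 := hi2
      rw [loopB, h]
      simp only [if_neg hi, runEndB_eq, if_pos hi2', List.nil_append, join_singleton]
      rfl
  | case4 i b h hi i2 e r hi2 ih =>
      have hb := bounds_of_pyGet?_eq_some nums i b h
      have hge := runEndA_ge nums i
      have hle := runEndA_le nums i (by omega)
      have hi2' : ¬ runEndA nums i = (nums.length : Int) - 1 := hi2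
      have hsome : ∃ c, PySem.List.pyGet? nums (runEndA nums i + 1) = some c := by
        cases hx : PySem.List.pyGet? nums (runEndA nums i + 1) with
        | some c => exact ⟨c, rfl⟩
        | none =>
            have hr := (PySem.List.pyGet?_eq_none_iff _ _).mp hx
            unfold PySem.Raise.InRange at hr
            omega
      obtain ⟨c, hc⟩ := hsome
      have hnn := loopB_ne_nil nums (runEndA nums i + 1) c hc
      rw [loopB, h]
      simp only [if_neg hi, runEndB_eq, if_neg hi2', List.nil_append]
      rw [loopB_acc nums ((nums.length : Int) - (runEndA nums i + 1)).toNat _ _ (le_refl _)]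
      rw [ih]
      cases hrest : loopB nums (runEndA nums i + 1) [] with
      | nil => exact absurd hrest hnn
      | cons d rest =>
          rw [List.singleton_append, join_cons_cons]
          simp only [r, e, i2]
          split_ifs <;> rfl

-- ===== VERDICT (by name: the statement is the Claim_ definition above) =====
theorem extract_spec : Claim_equal_extract := by
  intro nums index _ _
  unfold Spec_extract extract_alt
  exact extract_eq_alt nums index
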